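-- pv_equiv track=rewrite | github.com/bryceroche/mycelium | plan/greedy_eval.py | infer_operation_greedy
-- ===== SOURCE A (Python) =====
-- def infer_operation_greedy(window_text):
--     """
--     Simple keyword heuristic for operation inference.
--     This is ONLY for baseline evaluation - factor graph replaces this.
--     """
--     text = window_text.lower()
--
--     # Order matters - check more specific patterns first
--     if any(w in text for w in ['square root', 'sqrt', '√', '\\sqrt']):
--         return 'SQRT'
--     elif any(w in text for w in ['squared', 'square', '^2', '**2']):
--         return 'POW'
--     elif any(w in text for w in ['power', 'exponent', '^', '**']):
--         return 'POW'
--     elif any(w in text for w in ['times', 'multiply', 'product', '×', '*', 'multiplied']):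
--         return 'MUL'
--     elif any(w in text for w in ['divide', 'divided', 'ratio', '÷', '/', 'quotient']):
--         return 'DIV'
--     elif any(w in text for w in ['add', 'plus', 'sum', 'total', 'combined', '+']):
--         return 'ADD'
--     elif any(w in text for w in ['subtract', 'minus', 'difference', 'less', 'remain', '-', 'fewer']):
--         return 'SUB'
--     elif any(w in text for w in ['solve', 'find', 'calculate', 'compute', 'evaluate']):
--         return 'EVAL'
--     elif any(w in text for w in ['factor']):
--         return 'FACTOR'
--     elif any(w in text for w in ['equal', '=']):
--         return 'EQ'
--     else:
--         return 'UNKNOWN'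
-- ===== SOURCE B (Python) =====
-- # B: priority-minimisation over one flat keyword table, no branch chain and no
-- # first-match short-circuit: every keyword is tested, the smallest matched
-- # priority wins, and the label is looked up in a rank->label array.
-- LABELS = ['SQRT', 'POW', 'POW', 'MUL', 'DIV', 'ADD', 'SUB', 'EVAL', 'FACTOR', 'EQ']
--
-- KEYWORDS = [
--     ('square root', 0), ('sqrt', 0), ('√', 0), ('\\sqrt', 0),
--     ('squared', 1), ('square', 1), ('^2', 1), ('**2', 1),
--     ('power', 2), ('exponent', 2), ('^', 2), ('**', 2),
--     ('times', 3), ('multiply', 3), ('product', 3), ('×', 3), ('*', 3), ('multiplied', 3),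
--     ('divide', 4), ('divided', 4), ('ratio', 4), ('÷', 4), ('/', 4), ('quotient', 4),
--     ('add', 5), ('plus', 5), ('sum', 5), ('total', 5), ('combined', 5), ('+', 5),
--     ('subtract', 6), ('minus', 6), ('difference', 6), ('less', 6), ('remain', 6), ('-', 6), ('fewer', 6),
--     ('solve', 7), ('find', 7), ('calculate', 7), ('compute', 7), ('evaluate', 7),
--     ('factor', 8),
--     ('equal', 9), ('=', 9),
-- ]
--
--
-- def infer_operation_greedy(window_text):
--     text = window_text.lower()
--     best = min((rank for kw, rank in KEYWORDS if kw in text), default=None)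
--     return 'UNKNOWN' if best is None else LABELS[best]
-- ===== Notes on version B (the rewrite author's own statement) =====
-- stated objective: alternative
-- what changed: Replaced the short-circuiting ten-branch if-elif chain with priority minimisation: one flat (keyword, rank) table is scanned in full, the minimum matched rank is taken, and the result is looked up in a rank-to-label array.
import Mathlib
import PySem

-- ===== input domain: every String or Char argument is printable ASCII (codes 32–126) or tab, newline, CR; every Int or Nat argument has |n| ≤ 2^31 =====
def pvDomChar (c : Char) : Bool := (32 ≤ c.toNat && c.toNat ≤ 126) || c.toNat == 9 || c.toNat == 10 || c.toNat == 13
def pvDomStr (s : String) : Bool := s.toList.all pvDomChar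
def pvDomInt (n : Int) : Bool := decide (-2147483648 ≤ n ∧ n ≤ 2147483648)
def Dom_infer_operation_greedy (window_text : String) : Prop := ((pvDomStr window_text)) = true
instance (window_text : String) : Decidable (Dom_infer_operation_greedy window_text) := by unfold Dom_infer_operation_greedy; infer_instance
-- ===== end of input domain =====

-- B replaces the if-elif chain by priority minimisation over one flat keyword table (objective: alternative).
-- ===== PORT A =====
def infer_operation_greedy (window_text : String) : String :=
  let text := PySem.Str.lower window_text
  if ["square root", "sqrt", "√", "\\sqrt"].any (fun w => PySem.Str.isIn w text) then "SQRT"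
  else if ["squared", "square", "^2", "**2"].any (fun w => PySem.Str.isIn w text) then "POW"
  else if ["power", "exponent", "^", "**"].any (fun w => PySem.Str.isIn w text) then "POW"
  else if ["times", "multiply", "product", "×", "*", "multiplied"].any (fun w => PySem.Str.isIn w text) then "MUL"
  else if ["divide", "divided", "ratio", "÷", "/", "quotient"].any (fun w => PySem.Str.isIn w text) then "DIV"
  else if ["add", "plus", "sum", "total", "combined", "+"].any (fun w => PySem.Str.isIn w text) then "ADD"
  else if ["subtract", "minus", "difference", "less", "remain", "-", "fewer"].any (fun w => PySem.Str.isIn w text) then "SUB"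
  else if ["solve", "find", "calculate", "compute", "evaluate"].any (fun w => PySem.Str.isIn w text) then "EVAL"
  else if ["factor"].any (fun w => PySem.Str.isIn w text) then "FACTOR"
  else if ["equal", "="].any (fun w => PySem.Str.isIn w text) then "EQ"
  else "UNKNOWN"

-- ===== PORT B =====
-- rank -> label array
def pvLabels : List String :=
  ["SQRT", "POW", "POW", "MUL", "DIV", "ADD", "SUB", "EVAL", "FACTOR", "EQ"]

-- flat (keyword, rank) table
def pvKeywords : List (String × Nat) :=
  [("square root", 0), ("sqrt", 0), ("√", 0), ("\\sqrt", 0),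
   ("squared", 1), ("square", 1), ("^2", 1), ("**2", 1),
   ("power", 2), ("exponent", 2), ("^", 2), ("**", 2),
   ("times", 3), ("multiply", 3), ("product", 3), ("×", 3), ("*", 3), ("multiplied", 3),
   ("divide", 4), ("divided", 4), ("ratio", 4), ("÷", 4), ("/", 4), ("quotient", 4),
   ("add", 5), ("plus", 5), ("sum", 5), ("total", 5), ("combined", 5), ("+", 5),
   ("subtract", 6), ("minus", 6), ("difference", 6), ("less", 6), ("remain", 6), ("-", 6), ("fewer", 6),
   ("solve", 7), ("find", 7), ("calculate", 7), ("compute", 7), ("evaluate", 7),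
   ("factor", 8),
   ("equal", 9), ("=", 9)]

-- min over the ranks of the matching keywords (Python's min(..., default=None))
def pvMinMatch : List (String × Nat) → String → Option Nat
  | [], _ => none
  | (kw, r) :: rest, text =>
      let m := pvMinMatch rest text
      if PySem.Str.isIn kw text then
        some (match m with | none => r | some v => Nat.min r v)
      else m

def infer_operation_greedy_alt (window_text : String) : String :=
  let text := PySem.Str.lower window_text
  match pvMinMatch pvKeywords text with
  | none => "UNKNOWN"
  | some r => pvLabels.getD r "UNKNOWN"

-- ===== PRECONDITION & SPEC =====
def Spec_infer_operation_greedy (window_text : String) (out : String) : Prop := out = infer_operation_greedy_alt window_text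
instance (window_text : String) (out : String) : Decidable (Spec_infer_operation_greedy window_text out) := by unfold Spec_infer_operation_greedy; infer_instance

-- ===== CLAIM (what is proved, stated in full; the proofs are below) =====
def Claim_equal_infer_operation_greedy : Prop := ∀ (window_text : String), Dom_infer_operation_greedy window_text → Spec_infer_operation_greedy window_text (infer_operation_greedy window_text)

-- ===== LEMMAS AND PROOFS =====

-- combine two optional minima
def pvOMin : Option Nat → Option Nat → Option Nat
  | none, b => b
  | some a, none => some a
  | some a, some b => some (Nat.min a b)

theorem pvMinMatch_append (t₁ t₂ : List (String × Nat)) (text : String) :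
    pvMinMatch (t₁ ++ t₂) text = pvOMin (pvMinMatch t₁ text) (pvMinMatch t₂ text) := by
  induction t₁ with
  | nil => simp [pvMinMatch, pvOMin]
  | cons hd tl ih =>
      obtain ⟨kw, r⟩ := hd
      simp only [List.cons_append, pvMinMatch, ih]
      by_cases h : PySem.Str.isIn kw text = true
      · rw [if_pos h, if_pos h]
        cases hm : pvMinMatch tl text <;> cases hm2 : pvMinMatch t₂ text <;>
          simp [pvOMin, Nat.min_assoc]
      · rw [if_neg h, if_neg h]

theorem pvMinMatch_group (kws : List String) (r : ℕ) (text : String) :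
    pvMinMatch (kws.map (fun k => (k, r))) text =
      if kws.any (fun w => PySem.Str.isIn w text) then some r else none := by
  induction kws with
  | nil => simp [pvMinMatch]
  | cons hd tl ih =>
      simp only [List.map_cons, pvMinMatch, ih, List.any_cons]
      by_cases h : PySem.Str.isIn hd text = true
      · rw [if_pos h, if_pos (show (PySem.Str.isIn hd text || tl.any fun w => PySem.Str.isIn w text) = true by
          simp only [Bool.or_eq_true]; exact Or.inl h)]
        by_cases h2 : (tl.any fun w => PySem.Str.isIn w text) = true
        · rw [if_pos h2]; simp
        · rw [if_neg h2]
      · rw [if_neg h]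
        by_cases h2 : (tl.any fun w => PySem.Str.isIn w text) = true
        · rw [if_pos h2, if_pos (show (PySem.Str.isIn hd text || tl.any fun w => PySem.Str.isIn w text) = true by
            simp only [Bool.or_eq_true]; exact Or.inr h2)]
        · rw [if_neg h2, if_neg (show ¬ (PySem.Str.isIn hd text || tl.any fun w => PySem.Str.isIn w text) = true by
            simp only [Bool.or_eq_true, not_or]; exact ⟨h, h2⟩)]

theorem pvKeywords_groups :
    pvKeywords =
      (["square root", "sqrt", "√", "\\sqrt"].map (fun k => (k, 0))) ++
      ((["squared", "square", "^2", "**2"].map (fun k => (k, 1))) ++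
      ((["power", "exponent", "^", "**"].map (fun k => (k, 2))) ++
      ((["times", "multiply", "product", "×", "*", "multiplied"].map (fun k => (k, 3))) ++
      ((["divide", "divided", "ratio", "÷", "/", "quotient"].map (fun k => (k, 4))) ++
      ((["add", "plus", "sum", "total", "combined", "+"].map (fun k => (k, 5))) ++
      ((["subtract", "minus", "difference", "less", "remain", "-", "fewer"].map (fun k => (k, 6))) ++
      ((["solve", "find", "calculate", "compute", "evaluate"].map (fun k => (k, 7))) ++
      ((["factor"].map (fun k => (k, 8))) ++
      (["equal", "="].map (fun k => (k, 9))))))))))) := rfl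

-- ===== VERDICT (by name: the statement is the Claim_ definition above) =====
set_option maxHeartbeats 2000000 in
theorem infer_operation_greedy_spec : Claim_equal_infer_operation_greedy := by
  intro s _
  unfold Spec_infer_operation_greedy infer_operation_greedy infer_operation_greedy_alt
  rw [pvKeywords_groups]
  simp only [pvMinMatch_append, pvMinMatch_group]
  cases h0 : ["square root", "sqrt", "√", "\\sqrt"].any (fun w => PySem.Str.isIn w (PySem.Str.lower s)) <;>
  cases h1 : ["squared", "square", "^2", "**2"].any (fun w => PySem.Str.isIn w (PySem.Str.lower s)) <;>
  cases h2 : ["power", "exponent", "^", "**"].any (fun w => PySem.Str.isIn w (PySem.Str.lower s)) <;>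
  cases h3 : ["times", "multiply", "product", "×", "*", "multiplied"].any (fun w => PySem.Str.isIn w (PySem.Str.lower s)) <;>
  cases h4 : ["divide", "divided", "ratio", "÷", "/", "quotient"].any (fun w => PySem.Str.isIn w (PySem.Str.lower s)) <;>
  cases h5 : ["add", "plus", "sum", "total", "combined", "+"].any (fun w => PySem.Str.isIn w (PySem.Str.lower s)) <;>
  cases h6 : ["subtract", "minus", "difference", "less", "remain", "-", "fewer"].any (fun w => PySem.Str.isIn w (PySem.Str.lower s)) <;>
  cases h7 : ["solve", "find", "calculate", "compute", "evaluate"].any (fun w => PySem.Str.isIn w (PySem.Str.lower s)) <;>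
  cases h8 : ["factor"].any (fun w => PySem.Str.isIn w (PySem.Str.lower s)) <;>
  cases h9 : ["equal", "="].any (fun w => PySem.Str.isIn w (PySem.Str.lower s)) <;>
  rfl
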